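-- pv_equiv track=rewrite | github.com/neelbanodiya/MUVERA-Multi-Vector-Retrieval-via-Fixed-Dimensional-Encodings- | data_processing.py | create_chunks_from_jsonlike
-- ===== SOURCE A (Python) =====
-- def create_chunks_from_jsonlike(structured: list):
--     chunks = []
--
--     # handle intro_snippet
--     intro_text = ""
--     if structured and "intro_snippet" in structured[0]:
--         intro_text = structured[0]["intro_snippet"]
--         structured = structured[1:]  # remove intro block
--
--     # pairwise combine title+snippet
--     for i in range(0, len(structured), 2):
--         first = structured[i]
--         second = structured[i+1] if i+1 < len(structured) else None
--
--         text_parts = []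
--         if intro_text and i == 0:  # concat intro with first pair
--             text_parts.append(intro_text)
--
--         text_parts.append(first.get("title", "") + " " + first.get("snippet", ""))
--
--         if second:
--             text_parts.append(second.get("title", "") + " " + second.get("snippet", ""))
--
--         chunks.append(" ".join(text_parts).strip())
--
--     return chunks
-- ===== SOURCE B (Python) =====
-- def _pair_up(items):
--     # recursive pairing: join the first two texts, recurse on the rest
--     if len(items) < 2:
--         return items[:]
--     return [items[0] + " " + items[1]] + _pair_up(items[2:])
--
--
-- def create_chunks_from_jsonlike(structured: list):
--     # phase-separated: extract intro, map dicts to texts, pair recursively, then strip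
--     intro_text = ""
--     if structured and "intro_snippet" in structured[0]:
--         intro_text = structured[0]["intro_snippet"]
--         structured = structured[1:]
--
--     items = [d.get("title", "") + " " + d.get("snippet", "") for d in structured]
--     raw = _pair_up(items)
--
--     if intro_text and raw:
--         raw[0] = intro_text + " " + raw[0]
--
--     return [c.strip() for c in raw]
-- ===== Notes on version B (the rewrite author's own statement) =====
-- stated objective: simpler
-- what changed: A interleaves everything in one index loop over range(0, len, 2) with an i+1 lookahead, an i==0 intro special case and a per-iteration join/strip; B separates the phases: map each dict to its title+snippet text, pair the texts by a simple recursion, prepend the intro to the first chunk once, then strip every chunk.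
import Mathlib
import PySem

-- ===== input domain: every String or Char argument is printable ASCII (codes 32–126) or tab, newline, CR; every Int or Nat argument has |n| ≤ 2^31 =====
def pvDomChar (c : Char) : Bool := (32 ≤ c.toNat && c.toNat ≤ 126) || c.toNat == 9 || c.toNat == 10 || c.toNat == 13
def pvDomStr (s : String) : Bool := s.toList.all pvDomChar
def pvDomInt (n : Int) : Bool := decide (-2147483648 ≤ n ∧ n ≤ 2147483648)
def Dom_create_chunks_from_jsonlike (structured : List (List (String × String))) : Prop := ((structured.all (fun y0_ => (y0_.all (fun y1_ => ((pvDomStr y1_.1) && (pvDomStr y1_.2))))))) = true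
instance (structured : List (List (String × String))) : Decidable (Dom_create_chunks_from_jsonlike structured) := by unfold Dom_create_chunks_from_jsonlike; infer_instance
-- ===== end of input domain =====

-- B re-implements A by separating phases (map dicts to texts, pair recursively, prepend intro, strip each)
-- instead of A's single index loop with lookahead; objective: simpler, same cost.

-- shared text of one dict: d.get("title", "") + " " + d.get("snippet", "")  (identical sub-expression in both Pythons)
def pvT (d : PySem.Dict String String) : String :=
  d.getD "title" "" ++ " " ++ d.getD "snippet" ""

-- intro extraction: the first five lines, shared verbatim by both Pythons; returns (intro_text, remaining list)
def pvIntro (structured : List (List (String × String))) :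
    String × List (List (String × String)) :=
  match structured with
  | [] => ("", [])
  | d0 :: rest =>
    if (PySem.Dict.mk d0).contains "intro_snippet" then
      ((PySem.Dict.mk d0).getD "intro_snippet" "", rest)
    else ("", d0 :: rest)

-- ===== PORT A =====
def create_chunks_from_jsonlike (structured : List (List (String × String))) : List String :=
  let p := pvIntro structured
  let intro_text := p.1
  let st := p.2
  (PySem.List.pyRange 0 (st.length : Int) 2).foldl
    (fun chunks i =>
      let first := PySem.Dict.mk (PySem.List.pyGetD st i [])
      let second : Option (PySem.Dict String String) :=
        if i + 1 < (st.length : Int) then some (PySem.Dict.mk (PySem.List.pyGetD st (i + 1) [])) else none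
      let text_parts : List String :=
        (if intro_text ≠ "" ∧ i = 0 then [intro_text] else []) ++
        [pvT first] ++
        (match second with
         | some s => if s.items ≠ [] then [pvT s] else []
         | none => [])
      chunks ++ [PySem.Str.strip (PySem.Str.join " " text_parts)])
    []

-- ===== PORT B =====
def pvPairUp : List String → List String
  | a :: b :: t => (a ++ " " ++ b) :: pvPairUp t
  | items => items

def create_chunks_from_jsonlike_alt (structured : List (List (String × String))) : List String :=
  let p := pvIntro structured
  let intro_text := p.1
  let items := p.2.map (fun d => pvT (PySem.Dict.mk d))
  let raw := pvPairUp items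
  let raw :=
    if intro_text ≠ "" ∧ raw ≠ [] then
      PySem.List.pySetD raw 0 (intro_text ++ " " ++ PySem.List.pyGetD raw 0 "")
    else raw
  raw.map PySem.Str.strip

-- ===== PRECONDITION & SPEC =====
def Spec_create_chunks_from_jsonlike (structured : List (List (String × String))) (out : List String) : Prop := out = create_chunks_from_jsonlike_alt structured
instance (structured : List (List (String × String))) (out : List String) : Decidable (Spec_create_chunks_from_jsonlike structured out) := by unfold Spec_create_chunks_from_jsonlike; infer_instance

-- ===== CLAIM (what is proved, stated in full; the proofs are below) =====
def Claim_equal_create_chunks_from_jsonlike : Prop := ∀ (structured : List (List (String × String))), Dom_create_chunks_from_jsonlike structured → Spec_create_chunks_from_jsonlike structured (create_chunks_from_jsonlike structured)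

-- ===== LEMMAS AND PROOFS =====

-- the chunk A's iteration i produces (A's loop body modulo the accumulator)
def pvG (st : List (List (String × String))) (intro : String) (i : Int) : String :=
  PySem.Str.strip (PySem.Str.join " "
    ((if intro ≠ "" ∧ i = 0 then [intro] else []) ++
     [pvT (PySem.Dict.mk (PySem.List.pyGetD st i []))] ++
     (match (if i + 1 < (st.length : Int) then some (PySem.Dict.mk (PySem.List.pyGetD st (i + 1) [])) else none) with
      | some s => if s.items ≠ [] then [pvT s] else []
      | none => [])))

-- A's per-pair text before the intro/strip post-processing (the `if b ≠ []` mirrors Python's `if second:`)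
def pvPairA : List (List (String × String)) → List String
  | [] => []
  | [a] => [pvT (PySem.Dict.mk a)]
  | a :: b :: t =>
    (if b ≠ [] then pvT (PySem.Dict.mk a) ++ " " ++ pvT (PySem.Dict.mk b)
     else pvT (PySem.Dict.mk a)) :: pvPairA t

-- prepend the intro text to the first chunk when present
def pvPrep (intro : String) (l : List String) : List String :=
  if intro ≠ "" ∧ l ≠ [] then (intro ++ " " ++ l.headD "") :: l.tail else l

lemma pv_join_one (x : String) : PySem.Str.join " " [x] = x := by
  apply String.toList_inj.mp; simp [PySem.Str.join, PySem.Chars.join, List.intercalate]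

lemma pv_join_two (x y : String) : PySem.Str.join " " [x, y] = x ++ " " ++ y := by
  apply String.toList_inj.mp; simp [PySem.Str.join, PySem.Chars.join, List.intercalate]

lemma pv_join_three (x y z : String) :
    PySem.Str.join " " [x, y, z] = x ++ " " ++ y ++ " " ++ z := by
  apply String.toList_inj.mp; simp [PySem.Str.join, PySem.Chars.join, List.intercalate]

-- stripping ignores two trailing blanks
lemma pv_chars_strip_blanks (y : List Char) :
    PySem.Chars.strip (y ++ [' ', ' ']) = PySem.Chars.strip y := by
  have hsp : List.dropWhile PySem.Chars.isspace [' ', ' '] = ([] : List Char) := by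
    simp [List.dropWhile, PySem.Chars.isspace]
  have hsp2 : PySem.Chars.isspace ' ' = true := rfl
  simp only [PySem.Chars.strip, PySem.Chars.lstrip, PySem.Chars.rstrip]
  rw [List.dropWhile_append, hsp]
  by_cases h : (List.dropWhile PySem.Chars.isspace y).isEmpty
  · simp [List.isEmpty_iff.mp h]
  · simp [h, List.reverse_append, hsp2]

lemma pv_strip_blanks (w u : String) :
    PySem.Str.strip (w ++ u ++ " " ++ " ") = PySem.Str.strip (w ++ u) := by
  apply String.toList_inj.mp
  rw [PySem.Str.toList_strip, PySem.Str.toList_strip]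
  have h : (w ++ u ++ " " ++ " ").toList = (w ++ u).toList ++ [' ', ' '] := by
    simp [String.toList_append]
  rw [h, pv_chars_strip_blanks]

-- relation: two chunk texts that strip the same under any prefix
def pvR (u v : String) : Prop := ∀ w : String, PySem.Str.strip (w ++ u) = PySem.Str.strip (w ++ v)

lemma pv_pair_rel (st : List (List (String × String))) :
    List.Forall₂ pvR (pvPairA st) (pvPairUp (st.map (fun d => pvT (PySem.Dict.mk d)))) := by
  induction st using pvPairA.induct with
  | case1 => simp [pvPairA, pvPairUp]
  | case2 a => simp [pvPairA, pvPairUp]; intro w; rfl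
  | case3 a b t ih =>
    simp only [List.map, pvPairA, pvPairUp]
    refine List.Forall₂.cons ?_ ih
    by_cases hb : b = []
    · subst hb
      simp only [ne_eq, not_true_eq_false, if_false]
      intro w
      have h1 : pvT (PySem.Dict.mk ([] : List (String × String))) = " " := rfl
      rw [h1, ← String.append_assoc, ← String.append_assoc, pv_strip_blanks]
    · simp only [hb, ne_eq, not_false_eq_true, if_true]
      intro w; rfl

lemma pv_map_strip_rel {m₁ m₂ : List String} (hm : List.Forall₂ pvR m₁ m₂) :
    m₁.map PySem.Str.strip = m₂.map PySem.Str.strip := by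
  induction hm with
  | nil => rfl
  | cons hx _ ih =>
    simp only [List.map]
    refine congrArg₂ _ ?_ ih
    simpa [String.empty_append] using hx ""

lemma pv_map_strip_prep {l₁ l₂ : List String} (intro : String)
    (h : List.Forall₂ pvR l₁ l₂) :
    (pvPrep intro l₁).map PySem.Str.strip = (pvPrep intro l₂).map PySem.Str.strip := by
  cases h with
  | nil => rfl
  | @cons u l₁' v l₂' hx ht =>
    by_cases hi : intro ≠ ""
    · simp only [pvPrep, hi, true_and, ne_eq, reduceCtorEq, not_false_eq_true, if_true,
        List.headD_cons, List.tail_cons, List.map]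
      refine congrArg₂ _ ?_ (pv_map_strip_rel ht)
      have := hx (intro ++ " ")
      simpa [String.append_assoc] using this
    · simp only [pvPrep, hi, false_and, if_false]
      exact pv_map_strip_rel (List.Forall₂.cons hx ht)

-- range(0, n, 2) peels its first index
lemma pv_pyRange_two_cons (n : Nat) :
    PySem.List.pyRange 0 ((n + 2 : Nat) : Int) 2
      = 0 :: (PySem.List.pyRange 0 (n : Int) 2).map (· + 2) := by
  rw [PySem.List.pyRange_of_pos _ _ (by norm_num), PySem.List.pyRange_of_pos _ _ (by norm_num)]
  have e1 : (if (0:Int) < ((n + 2 : Nat) : Int) then ((((n + 2 : Nat) : Int) - 0 + 2 - 1) / 2).toNat else 0)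
      = (n + 1) / 2 + 1 := by
    rw [if_pos (by omega)]
    omega
  have e2 : (if (0:Int) < ((n : Nat) : Int) then ((((n : Nat) : Int) - 0 + 2 - 1) / 2).toNat else 0)
      = (n + 1) / 2 := by
    by_cases hn : 0 < n
    · rw [if_pos (by omega)]
      omega
    · have hz : n = 0 := by omega
      subst hz
      simp
  rw [e1, e2, List.range_succ_eq_map]
  simp only [List.map_cons, List.map_map]
  refine congrArg₂ _ (by norm_num) ?_
  refine List.map_congr_left ?_
  intro k _
  simp only [Function.comp]
  push_cast
  ring

-- the sequence of chunks A's loop appends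
lemma pv_mapA (st : List (List (String × String))) (intro : String) :
    (PySem.List.pyRange 0 (st.length : Int) 2).map (pvG st intro)
      = (pvPrep intro (pvPairA st)).map PySem.Str.strip := by
  induction st using pvPairA.induct generalizing intro with
  | case1 =>
    have h : PySem.List.pyRange 0 ((([] : List (List (String × String))).length : Int)) 2 = [] := by
      simp [PySem.List.pyRange]
    rw [h]
    simp [pvPrep, pvPairA]
  | case2 a =>
    have hlen : (([a] : List (List (String × String))).length : Int) = 1 := by simp
    rw [hlen]
    have h1 : PySem.List.pyRange 0 (1 : Int) 2 = [0] := by decide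
    rw [h1]
    have hsec : ((if (0:Int) + 1 < (([a] : List (List (String × String))).length : Int)
        then some (PySem.Dict.mk (PySem.List.pyGetD [a] ((0:Int) + 1) [])) else none)
        : Option (PySem.Dict String String)) = none := by
      rw [if_neg]; simp
    simp only [List.map, pvG, hsec]
    by_cases hi : intro ≠ ""
    · simp [pvPrep, pvPairA, hi, pv_join_two, PySem.List.pyGetD_zero_cons]
    · simp [pvPrep, pvPairA, hi, pv_join_one, PySem.List.pyGetD_zero_cons]
  | case3 a b t ih =>
    have hl : ((a :: b :: t).length : Int) = ((t.length + 2 : Nat) : Int) := by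
      simp; omega
    rw [hl, pv_pyRange_two_cons]
    simp only [List.map_cons, List.map_map]
    -- the shifted tail of the loop: indices i+2 over t, never 0, intro never added
    have htail : ∀ i ∈ PySem.List.pyRange 0 ((t.length : Nat) : Int) 2,
        (pvG (a :: b :: t) intro ∘ (· + 2)) i = pvG t "" i := by
      intro i hi
      have h0 : 0 ≤ i := ((PySem.List.mem_pyRange_iff_of_pos (by norm_num) i).mp hi).1
      lift i to Nat using h0
      simp only [Function.comp_apply, pvG]
      have hg1 : PySem.List.pyGetD (a :: b :: t) ((i : Int) + 2) []
          = PySem.List.pyGetD t (i : Int) [] := by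
        have h2 : ((i : Int) + 2) = ((i + 2 : Nat) : Int) := by push_cast; ring
        rw [h2, PySem.List.pyGetD_natCast, PySem.List.pyGetD_natCast]
        simp
      have hg2 : PySem.List.pyGetD (a :: b :: t) ((i : Int) + 2 + 1) []
          = PySem.List.pyGetD t ((i : Int) + 1) [] := by
        have h1 : ((i : Int) + 2 + 1) = ((i + 3 : Nat) : Int) := by push_cast; ring
        have h2 : ((i : Int) + 1) = ((i + 1 : Nat) : Int) := by push_cast; ring
        rw [h1, h2, PySem.List.pyGetD_natCast, PySem.List.pyGetD_natCast]
        simp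
      have hcond : ((i : Int) + 2 + 1 < ((a :: b :: t).length : Int))
          ↔ ((i : Int) + 1 < (t.length : Int)) := by
        simp only [List.length_cons]
        push_cast
        omega
      have hifeq : (if (i : Int) + 2 + 1 < ((a :: b :: t).length : Int)
            then some (PySem.Dict.mk (PySem.List.pyGetD (a :: b :: t) ((i : Int) + 2 + 1) [])) else none)
          = (if (i : Int) + 1 < (t.length : Int)
            then some (PySem.Dict.mk (PySem.List.pyGetD t ((i : Int) + 1) [])) else none) := by
        rw [hg2]
        by_cases h : (i : Int) + 1 < (t.length : Int)
        · rw [if_pos (hcond.mpr h), if_pos h]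
        · rw [if_neg (fun hc => h (hcond.mp hc)), if_neg h]
      rw [hg1, hifeq,
        if_neg (fun h => absurd h.2 (by omega) : ¬(intro ≠ "" ∧ (i : Int) + 2 = 0)),
        if_neg (fun h => h.1 rfl : ¬(("" : String) ≠ "" ∧ (i : Int) = 0))]
    rw [List.map_congr_left htail, ih ""]
    have hprep0 : pvPrep "" (pvPairA t) = pvPairA t := by simp [pvPrep]
    rw [hprep0]
    -- the head chunk (i = 0): first = a, second = Some(b)
    have hfst : PySem.List.pyGetD (a :: b :: t) (0 : Int) [] = a :=
      PySem.List.pyGetD_zero_cons a (b :: t) []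
    have hsnd : PySem.List.pyGetD (a :: b :: t) ((0 : Int) + 1) [] = b := by
      have h2 : ((0 : Int) + 1) = ((1 : Nat) : Int) := by norm_num
      rw [h2, PySem.List.pyGetD_natCast]
      simp
    have hcond : ((0 : Int) + 1 < ((a :: b :: t).length : Int)) := by
      simp only [List.length_cons]
      push_cast
      omega
    simp only [pvG, hfst, if_pos hcond, hsnd]
    by_cases hb : b = [] <;> by_cases hi : intro = ""
    · subst hb
      simp [pvPairA, pvPrep, hi, pv_join_one]
    · subst hb
      simp [pvPairA, pvPrep, hi, pv_join_two]
    · simp [pvPairA, pvPrep, hi, hb, pv_join_two]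
    · simp [pvPairA, pvPrep, hi, hb, pv_join_three, String.append_assoc]

-- B's post-processing is pvPrep
lemma pv_altPost (intro : String) (raw : List String) :
    (if intro ≠ "" ∧ raw ≠ [] then
        PySem.List.pySetD raw 0 (intro ++ " " ++ PySem.List.pyGetD raw 0 "")
      else raw)
    = pvPrep intro raw := by
  unfold pvPrep
  by_cases h : intro ≠ "" ∧ raw ≠ []
  · rw [if_pos h, if_pos h]
    obtain ⟨-, hr⟩ := h
    cases raw with
    | nil => exact absurd rfl hr
    | cons r0 rt =>
      simp [PySem.List.pySetD, PySem.List.pySet?, PySem.List.pyIdx?, PySem.List.pyGetD_zero_cons]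
  · rw [if_neg h, if_neg h]

-- ===== VERDICT (by name: the statement is the Claim_ definition above) =====
theorem create_chunks_from_jsonlike_spec : Claim_equal_create_chunks_from_jsonlike := by
  intro structured _
  unfold Spec_create_chunks_from_jsonlike
  have hA : create_chunks_from_jsonlike structured
      = ((PySem.List.pyRange 0 ((pvIntro structured).2.length : Int) 2).map
          (pvG (pvIntro structured).2 (pvIntro structured).1)) := by
    show (PySem.List.pyRange 0 ((pvIntro structured).2.length : Int) 2).foldl
        (fun chunks i => chunks ++ [pvG (pvIntro structured).2 (pvIntro structured).1 i]) [] = _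
    rw [PySem.List.foldl_append_singleton_eq_map, List.nil_append]
  have hB : create_chunks_from_jsonlike_alt structured
      = (pvPrep (pvIntro structured).1
          (pvPairUp ((pvIntro structured).2.map (fun d => pvT (PySem.Dict.mk d))))).map
          PySem.Str.strip := by
    show ((if (pvIntro structured).1 ≠ "" ∧
            pvPairUp ((pvIntro structured).2.map (fun d => pvT (PySem.Dict.mk d))) ≠ [] then
          PySem.List.pySetD
            (pvPairUp ((pvIntro structured).2.map (fun d => pvT (PySem.Dict.mk d)))) 0
            ((pvIntro structured).1 ++ " " ++
              PySem.List.pyGetD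
                (pvPairUp ((pvIntro structured).2.map (fun d => pvT (PySem.Dict.mk d)))) 0 "")
        else pvPairUp ((pvIntro structured).2.map (fun d => pvT (PySem.Dict.mk d)))).map
          PySem.Str.strip) = _
    rw [pv_altPost]
  rw [hA, hB, pv_mapA]
  exact pv_map_strip_prep _ (pv_pair_rel _)
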